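-- pv_equiv track=rewrite | github.com/TIIIIIIW/SOFTWARE-DEVELOPMENT-2 | week1/ex_7/Test/test_main.py | find_x_6_8
-- ===== SOURCE A (Python) =====
-- def find_x_6_8(data,conditions):
--
--     x_6_8_find_index = []
--
--     for start in range(len(data)):
--
--         for target in range(len(data)):
--
--             if target == start :
--
--                 continue
--
--             if data[target] == data[start] + conditions :
--
--                 x_6_8_find_index.append([start,target])
--
--     return x_6_8_find_index
-- ===== SOURCE B (Python) =====
-- def find_x_6_8(data, conditions):
--     index_by_value = {}
--     for i, v in enumerate(data):
--         index_by_value.setdefault(v, []).append(i)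
--     result = []
--     for start, v in enumerate(data):
--         for target in index_by_value.get(v + conditions, []):
--             if target != start:
--                 result.append([start, target])
--     return result
-- ===== Notes on version B (the rewrite author's own statement) =====
-- stated objective: faster
-- what changed: Replaces A's O(n^2) double scan with a value-to-indices hash map built in one pass, then per start index a direct lookup of data[start]+conditions yields the matching targets.
import Mathlib
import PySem

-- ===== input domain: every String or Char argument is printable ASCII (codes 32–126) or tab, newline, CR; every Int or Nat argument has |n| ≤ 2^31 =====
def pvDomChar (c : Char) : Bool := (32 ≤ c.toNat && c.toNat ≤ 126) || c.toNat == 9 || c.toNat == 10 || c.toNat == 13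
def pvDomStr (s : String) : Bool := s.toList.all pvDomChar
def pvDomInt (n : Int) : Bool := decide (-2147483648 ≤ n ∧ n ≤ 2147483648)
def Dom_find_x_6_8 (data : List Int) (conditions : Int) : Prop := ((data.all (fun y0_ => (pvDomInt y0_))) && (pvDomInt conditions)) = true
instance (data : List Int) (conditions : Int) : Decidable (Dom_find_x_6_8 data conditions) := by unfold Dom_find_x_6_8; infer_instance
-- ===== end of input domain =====

-- ===== PORT A =====
-- B replaces A's quadratic double scan by a value→indices map built once; objective: faster (asymptotic).
def find_x_6_8 (data : List Int) (conditions : Int) : List (List Int) :=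
  (PySem.List.pyRange 0 (data.length : Int) 1).foldl (fun acc start =>
    (PySem.List.pyRange 0 (data.length : Int) 1).foldl (fun acc2 target =>
      if target = start then acc2
      else if PySem.List.pyGetD data target 0 = PySem.List.pyGetD data start 0 + conditions then
        acc2 ++ [[start, target]]
      else acc2) acc) []

-- ===== PORT B =====
def find_x_6_8_alt (data : List Int) (conditions : Int) : List (List Int) :=
  let idx : PySem.Dict Int (List Int) :=
    (PySem.List.enumerate data 0).foldl (fun d p => d.modify p.2 [] (fun l => l ++ [p.1])) PySem.Dict.empty
  (PySem.List.enumerate data 0).foldl (fun acc p =>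
    (idx.getD (p.2 + conditions) []).foldl (fun acc2 t =>
      if t ≠ p.1 then acc2 ++ [[p.1, t]] else acc2) acc) []

-- ===== PRECONDITION & SPEC =====
def Spec_find_x_6_8 (data : List Int) (conditions : Int) (out : List (List Int)) : Prop := out = find_x_6_8_alt data conditions
instance (data : List Int) (conditions : Int) (out : List (List Int)) : Decidable (Spec_find_x_6_8 data conditions out) := by unfold Spec_find_x_6_8; infer_instance

-- ===== CLAIM (what is proved, stated in full; the proofs are below) =====
def Claim_equal_find_x_6_8 : Prop := ∀ (data : List Int) (conditions : Int), Dom_find_x_6_8 data conditions → Spec_find_x_6_8 data conditions (find_x_6_8 data conditions)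

-- ===== LEMMAS AND PROOFS =====

-- the dict built by B's first loop maps each value w to the ascending list of its indices
theorem idx_getD (ps : List (Int × Int)) (d : PySem.Dict Int (List Int)) (w : Int) :
    (ps.foldl (fun d p => d.modify p.2 [] (fun l => l ++ [p.1])) d).getD w []
      = d.getD w [] ++ (ps.filter (fun p => p.2 = w)).map (·.1) := by
  induction ps generalizing d with
  | nil => simp
  | cons p ps ih =>
    simp only [List.foldl_cons, ih, List.filter_cons]
    by_cases h : p.2 = w
    · subst h
      simp [PySem.Dict.getD_modify_self]
    · rw [PySem.Dict.getD_modify_of_ne d [] _ (Ne.symm h)]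
      simp [h]

theorem find_x_6_8_spec' (data : List Int) (conditions : Int) :
    find_x_6_8 data conditions = find_x_6_8_alt data conditions := by
  unfold find_x_6_8 find_x_6_8_alt
  have hA : ∀ (s : Int) (acc : List (List Int)),
      (PySem.List.pyRange 0 (data.length : Int) 1).foldl (fun acc2 t =>
          if t = s then acc2
          else if PySem.List.pyGetD data t 0 = PySem.List.pyGetD data s 0 + conditions then
            acc2 ++ [[s, t]] else acc2) acc
        = acc ++ ((PySem.List.pyRange 0 (data.length : Int) 1).filter
              (fun t => decide (t ≠ s) && decide (PySem.List.pyGetD data t 0 = PySem.List.pyGetD data s 0 + conditions))).map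
            (fun t => [s, t]) := by
    intro s acc
    rw [show (fun (acc2 : List (List Int)) t =>
          if t = s then acc2
          else if PySem.List.pyGetD data t 0 = PySem.List.pyGetD data s 0 + conditions then
            acc2 ++ [[s, t]] else acc2)
        = (fun (acc2 : List (List Int)) t =>
            if (decide (t ≠ s) && decide (PySem.List.pyGetD data t 0 = PySem.List.pyGetD data s 0 + conditions)) = true then
              acc2 ++ [[s, t]] else acc2) from
      funext fun acc2 => funext fun t => by
        by_cases h1 : t = s <;>
          by_cases h2 : PySem.List.pyGetD data t 0 = PySem.List.pyGetD data s 0 + conditions <;>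
          simp [h1, h2]]
    exact PySem.List.foldl_append_if _ _ _ _
  have hB : ∀ (p : Int × Int) (L : List Int) (acc : List (List Int)),
      L.foldl (fun acc2 t => if t ≠ p.1 then acc2 ++ [[p.1, t]] else acc2) acc
        = acc ++ (L.filter (fun t => decide (t ≠ p.1))).map (fun t => [p.1, t]) := by
    intro p L acc
    rw [show (fun (acc2 : List (List Int)) t => if t ≠ p.1 then acc2 ++ [[p.1, t]] else acc2)
        = (fun (acc2 : List (List Int)) t =>
            if decide (t ≠ p.1) = true then acc2 ++ [[p.1, t]] else acc2) from
      funext fun acc2 => funext fun t => by by_cases h : t = p.1 <;> simp [h]]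
    exact PySem.List.foldl_append_if _ _ _ _
  simp only [hA, hB, PySem.List.foldl_append_eq_flatMap, List.nil_append]
  simp only [idx_getD]
  rw [PySem.List.enumerate_eq_map_pyRange data 0]
  rw [List.flatMap_map]
  apply List.flatMap_congr
  intro j _
  simp [List.filter_map, List.map_map, List.filter_filter, Function.comp, PySem.List.len]
  rfl
-- ===== VERDICT (by name: the statement is the Claim_ definition above) =====
theorem find_x_6_8_spec : Claim_equal_find_x_6_8 := by
  intro data conditions _
  unfold Spec_find_x_6_8
  exact find_x_6_8_spec' data conditions
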